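-- pv_equiv track=rewrite | github.com/dexforint/ITMaraphone2025 | utils/stuff/answers3.py | solve
-- ===== SOURCE A (Python) =====
-- def solve(spells, k, limits):
--     n = len(spells)
--
--     # Мы будем использовать динамическое программирование с мемоизацией
--     from functools import lru_cache
--
--     # Преобразуем список заклятий в отдельные списки длины и силы
--     lengths = [spell[0] for spell in spells]
--     powers = [spell[1] for spell in spells]
--
--     @lru_cache(maxsize=None)
--     def dp(i, *capacities):
--         if i == n:
--             return 0  # Больше заклятий нет
--
--         max_power = dp(i + 1, *capacities)  # Пропустить текущее заклятие
--
--         # Попробовать положить текущее заклятие в один из свитков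
--         for w in range(k):
--             if lengths[i] <= capacities[w]:
--                 new_capacities = list(capacities)
--                 new_capacities[w] -= lengths[i]
--                 max_power = max(max_power, powers[i] + dp(i + 1, *new_capacities))
--
--         return max_power
--
--     return dp(0, *limits)
-- ===== SOURCE B (Python) =====
-- def solve(spells, k, limits):
--     # Bottom-up forward DP over a dict of capacity states (max power per state),
--     # instead of A's lru_cache top-down recursion.
--     best = {tuple(limits): 0}
--     for length, power in spells:
--         nxt = dict(best)  # skipping the spell keeps every state as-is
--         for caps, total in best.items():
--             for w in range(k):
--                 if length <= caps[w]:
--                     nc = caps[:w] + (caps[w] - length,) + caps[w + 1:]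
--                     cand = total + power
--                     old = nxt.get(nc)
--                     if old is None or old < cand:
--                         nxt[nc] = cand
--         best = nxt
--     return max(best.values())
-- ===== Notes on version B (the rewrite author's own statement) =====
-- stated objective: alternative
-- what changed: Replaced the lru_cache top-down recursion over (spell index, capacity tuple) with a bottom-up forward DP that folds over the spells maintaining a dict from reachable capacity tuples to the maximum total power, merging duplicate states by max and returning max of the final dict's values.
import Mathlib
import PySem

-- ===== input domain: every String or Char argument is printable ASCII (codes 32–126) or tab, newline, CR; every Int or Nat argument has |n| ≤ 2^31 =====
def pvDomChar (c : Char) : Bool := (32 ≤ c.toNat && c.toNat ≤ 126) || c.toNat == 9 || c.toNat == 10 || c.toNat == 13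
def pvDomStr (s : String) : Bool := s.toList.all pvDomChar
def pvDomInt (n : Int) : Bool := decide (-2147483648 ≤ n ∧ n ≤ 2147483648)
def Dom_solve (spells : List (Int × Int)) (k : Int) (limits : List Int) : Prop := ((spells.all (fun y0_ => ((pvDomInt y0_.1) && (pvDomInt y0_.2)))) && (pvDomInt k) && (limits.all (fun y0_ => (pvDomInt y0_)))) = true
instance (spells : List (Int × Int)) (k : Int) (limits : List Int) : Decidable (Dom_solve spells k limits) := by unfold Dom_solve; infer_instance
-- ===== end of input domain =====

-- B replaces A's lru_cache top-down recursion by a bottom-up forward DP over a dict of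
-- capacity states (max total power per reachable capacity tuple); return values only.

-- ===== PORT A =====
-- dp(i, *capacities) of A; recursion on the index i, memoization dropped (same value).
def dpA (lengths powers : List Int) (k : Int) (i : Nat) (caps : List Int) : Int :=
  if _h : i < lengths.length then
    (PySem.List.pyRange 0 k 1).foldl
      (fun m w =>
        match PySem.List.pyGet? caps w with
        | some cw =>
            if lengths.getD i 0 ≤ cw then
              max m (powers.getD i 0 +
                dpA lengths powers k (i + 1) (PySem.List.pySetD caps w (cw - lengths.getD i 0)))
            else m
        | none => m)  -- Python raises IndexError here; excluded by Pre_solve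
      (dpA lengths powers k (i + 1) caps)
  else 0
termination_by lengths.length - i

def solve (spells : List (Int × Int)) (k : Int) (limits : List Int) : Int :=
  dpA (spells.map (fun s => s.1)) (spells.map (fun s => s.2)) k 0 limits

-- ===== PORT B =====
-- one spell of B's forward DP: carry every state (nxt starts as a copy of best) and add
-- every placement of the spell into a scroll w < k, keeping the max power per state.
def stepB (k len pw : Int) (best : PySem.Dict (List Int) Int) : PySem.Dict (List Int) Int :=
  best.items.foldl
    (fun nxt e =>
      (PySem.List.pyRange 0 k 1).foldl
        (fun nxt w =>
          match PySem.List.pyGet? e.1 w with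
          | some cw =>
              if len ≤ cw then
                let nc := PySem.List.slice e.1 none (some w) ++ [cw - len] ++
                          PySem.List.slice e.1 (some (w + 1)) none
                let cand := e.2 + pw
                match nxt.get? nc with
                | none => nxt.insert nc cand
                | some old => if old < cand then nxt.insert nc cand else nxt
              else nxt
          | none => nxt)  -- Python raises IndexError here; excluded by Pre_solve
        nxt)
    best

def solve_alt (spells : List (Int × Int)) (k : Int) (limits : List Int) : Int :=
  let init : PySem.Dict (List Int) Int := PySem.Dict.empty.insert limits 0
  let best := spells.foldl (fun b sp => stepB k sp.1 sp.2 b) init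
  match PySem.List.max? best.values (fun v => v) with
  | some m => m
  | none => 0  -- unreachable: best always holds at least the initial state

-- ===== PRECONDITION & SPEC =====
-- Pre_solve excludes exactly the inputs where A raises IndexError: with at least one
-- spell, the scroll loop reads capacities[w] for every w < k, so k must be ≤ len(limits).
def Pre_solve (spells : List (Int × Int)) (k : Int) (limits : List Int) : Prop :=
  spells = [] ∨ k ≤ (limits.length : Int)
instance (spells : List (Int × Int)) (k : Int) (limits : List Int) : Decidable (Pre_solve spells k limits) := by unfold Pre_solve; infer_instance

def pvWitness_solve : (List (Int × Int)) × Int × List Int := ([(1, 2), (2, 3)], 2, [3, 1])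

def Spec_solve (spells : List (Int × Int)) (k : Int) (limits : List Int) (out : Int) : Prop := out = solve_alt spells k limits
instance (spells : List (Int × Int)) (k : Int) (limits : List Int) (out : Int) : Decidable (Spec_solve spells k limits out) := by unfold Spec_solve; infer_instance

-- ===== CLAIM (what is proved, stated in full; the proofs are below) =====
def Claim_equal_solve : Prop := ∀ (spells : List (Int × Int)) (k : Int) (limits : List Int), Dom_solve spells k limits → Pre_solve spells k limits → Spec_solve spells k limits (solve spells k limits)


-- ===== LEMMAS AND PROOFS =====

-- max of two optional Ints (none = "no candidate"); the shape both DPs accumulate in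
def omax : Option Int → Option Int → Option Int
  | none, b => b
  | a, none => a
  | some x, some y => some (max x y)

-- the common mathematical value: best power of `spells` into capacities `caps`
def Fv (k : Int) : List (Int × Int) → List Int → Int
  | [], _ => 0
  | sp :: rest, caps =>
    (PySem.List.pyRange 0 k 1).foldl
      (fun m w =>
        match PySem.List.pyGet? caps w with
        | some cw =>
            if sp.1 ≤ cw then
              max m (sp.2 + Fv k rest (PySem.List.pySetD caps w (cw - sp.1)))
            else m
        | none => m)
      (Fv k rest caps)

-- max over dict entries (c, p) of p + g c
def Mx? (g : List Int → Int) : List (List Int × Int) → Option Int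
  | [] => none
  | e :: t => some (match Mx? g t with | none => e.2 + g e.1 | some m => max (e.2 + g e.1) m)

def vmax : List Int → Option Int
  | [] => none
  | x :: t => some (match vmax t with | none => x | some m => max x m)

-- max over the placements of one spell (length l, bonus X) of one state c into scrolls ws
def Rv (g : List Int → Int) (l X : Int) (c : List Int) : List Int → Option Int
  | [] => none
  | w :: ws =>
    match PySem.List.pyGet? c w with
    | some cw =>
        if l ≤ cw then omax (some (X + g (PySem.List.pySetD c w (cw - l)))) (Rv g l X c ws)
        else Rv g l X c ws
    | none => Rv g l X c ws

-- max over all entries of their placement maxima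
def Sv (g : List Int → Int) (l pw : Int) (ws : List Int) : List (List Int × Int) → Option Int
  | [] => none
  | e :: t => omax (Rv g l (e.2 + pw) e.1 ws) (Sv g l pw ws t)

-- dict invariant: keys are distinct
def NK (d : PySem.Dict (List Int) Int) : Prop := (d.items.map Prod.fst).Nodup

theorem omax_none_right (a : Option Int) : omax a none = a := by cases a <;> rfl

theorem omax_assoc (a b c : Option Int) : omax (omax a b) c = omax a (omax b c) := by
  cases a <;> cases b <;> cases c <;> simp [omax, max_assoc]

-- ---------- A-side: dpA computes Fv ----------
theorem dpA_eq_Fv (spells : List (Int × Int)) (k : Int) :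
    ∀ (m i : Nat) (caps : List Int), spells.length - i = m →
      dpA (spells.map (fun s => s.1)) (spells.map (fun s => s.2)) k i caps
        = Fv k (spells.drop i) caps := by
  intro m
  induction m with
  | zero =>
      intro i caps h
      rw [dpA, dif_neg (by simp only [List.length_map]; omega),
          List.drop_eq_nil_of_le (by omega)]
      rfl
  | succ m ih =>
      intro i caps h
      have hi : i < spells.length := by omega
      have ih' : ∀ caps, dpA (spells.map (fun s => s.1)) (spells.map (fun s => s.2)) k (i + 1) caps
          = Fv k (spells.drop (i + 1)) caps := fun c => ih (i + 1) c (by omega)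
      have h1 : (spells.map (fun s => s.1)).getD i 0 = spells[i].1 := by
        rw [List.getD_eq_getElem _ _ (by simpa using hi)]; simp
      have h2 : (spells.map (fun s => s.2)).getD i 0 = spells[i].2 := by
        rw [List.getD_eq_getElem _ _ (by simpa using hi)]; simp
      rw [dpA, dif_pos (by simpa using hi),
          show spells.drop i = spells[i] :: spells.drop (i + 1) from (List.getElem_cons_drop hi).symm]
      simp only [Fv, h1, h2, ih']

-- ---------- generic max bookkeeping ----------
theorem foldl_max_eq (t : List Int) :
    ∀ x : Int, t.foldl max x = match vmax t with | none => x | some m => max x m := by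
  induction t with
  | nil => intro x; simp [vmax]
  | cons a t ih =>
      intro x
      simp only [List.foldl_cons, vmax, ih]
      cases h : vmax t <;> simp [max_assoc]

theorem max?_eq_vmax (l : List Int) : PySem.List.max? l (fun v => v) = vmax l := by
  cases l with
  | nil => simp [PySem.List.max?, vmax]
  | cons x t => rw [PySem.List.max?_id_cons, foldl_max_eq]; cases h : vmax t <;> simp [vmax, h]

theorem Mx?_eq_vmax (g : List Int → Int) (l : List (List Int × Int)) :
    Mx? g l = vmax (l.map (fun e => e.2 + g e.1)) := by
  induction l with
  | nil => rfl
  | cons e t ih => simp only [Mx?, List.map_cons, vmax, ih]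

theorem Mx?_append (g : List Int → Int) (l1 l2 : List (List Int × Int)) :
    Mx? g (l1 ++ l2) = omax (Mx? g l1) (Mx? g l2) := by
  induction l1 with
  | nil => rfl
  | cons e t ih =>
      simp only [List.cons_append, Mx?, ih]
      cases Mx? g t <;> cases Mx? g l2 <;> simp [omax, max_assoc]

theorem le_Mx? (g : List Int → Int) :
    ∀ (l : List (List Int × Int)) (e : List Int × Int), e ∈ l →
      ∀ m, Mx? g l = some m → e.2 + g e.1 ≤ m := by
  intro l
  induction l with
  | nil => intro e he; simp at he
  | cons a t ih =>
      intro e he m h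
      simp only [Mx?, Option.some.injEq] at h
      rcases List.mem_cons.mp he with rfl | he'
      · cases hv : Mx? g t <;> rw [hv] at h <;> simp at h <;> omega
      · cases t with
        | nil => simp at he'
        | cons b u =>
            cases hv : Mx? g (b :: u) with
            | none => simp [Mx?] at hv
            | some mt =>
                have := ih e he' mt hv
                rw [hv] at h; simp at h; omega

-- ---------- dict lemmas ----------
theorem Mx?_replace (g : List Int → Int) (c : List Int) (v old : Int) :
    ∀ l : List (List Int × Int), (l.map Prod.fst).Nodup →
      l.find? (fun p => p.1 == c) = some (c, old) → old ≤ v →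
      Mx? g (l.map (fun p => if p.1 == c then (c, v) else p))
        = omax (Mx? g l) (some (v + g c)) := by
  intro l
  induction l with
  | nil => intro _ hf; simp at hf
  | cons e t ih =>
      intro hnd hf hle
      by_cases he : e.1 = c
      · rw [List.find?_cons_of_pos (h := by simp [he])] at hf
        have he2 : e = (c, old) := by simpa using hf
        subst he2
        have hcnot : c ∉ t.map Prod.fst := by
          simp only [List.map_cons, List.nodup_cons] at hnd; exact hnd.1
        have htmap : t.map (fun p => if p.1 == c then (c, v) else p) = t := by
          conv_rhs => rw [← List.map_id t]
          apply List.map_congr_left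
          intro p hp
          have hpc : p.1 ≠ c := fun hpc => hcnot (hpc ▸ List.mem_map_of_mem hp)
          simp [hpc]
        simp only [List.map_cons, htmap, BEq.rfl, if_pos]
        simp only [Mx?]
        cases Mx? g t <;> simp [omax] <;> omega
      · rw [List.find?_cons_of_neg (h := by simp [he])] at hf
        have hnd' : (t.map Prod.fst).Nodup := by
          simp only [List.map_cons, List.nodup_cons] at hnd; exact hnd.2
        have hih := ih hnd' hf hle
        have hne : ¬((e.1 == c) = true) := by simp [he]
        simp only [List.map_cons, Mx?, if_neg hne]
        rw [hih]
        cases hv : Mx? g t <;> simp [omax]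

-- the "if nc not better, keep; else overwrite" update of B, as one dict expression
theorem condIns (g : List Int → Int) (d : PySem.Dict (List Int) Int) (hnk : NK d)
    (c : List Int) (v : Int) :
    NK (match d.get? c with
        | none => d.insert c v
        | some old => if old < v then d.insert c v else d) ∧
    Mx? g (match d.get? c with
        | none => d.insert c v
        | some old => if old < v then d.insert c v else d).items
      = omax (Mx? g d.items) (some (v + g c)) := by
  cases hg : d.get? c with
  | none =>
      have hfind : d.items.find? (fun p => p.1 == c) = none := by
        simpa [PySem.Dict.get?] using hg
      rw [List.find?_eq_none] at hfind
      have hcont : d.contains c = false := by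
        simp only [PySem.Dict.contains, List.any_eq_false]
        intro p hp
        simpa using hfind p hp
      have hitems : (d.insert c v).items = d.items ++ [(c, v)] := by
        simp [PySem.Dict.insert, hcont]
      have hnotmem : c ∉ d.items.map Prod.fst := by
        intro hc
        obtain ⟨p, hp, hpc⟩ := List.mem_map.mp hc
        exact absurd (by simp [hpc]) (hfind p hp)
      constructor
      · unfold NK
        rw [hitems, List.map_append]
        simp only [List.nodup_append, List.map_cons, List.map_nil]
        refine ⟨hnk, List.nodup_singleton c, ?_⟩
        intro a ha b hb
        rw [List.mem_singleton] at hb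
        subst hb
        exact fun h => hnotmem (h ▸ ha)
      · rw [hitems, Mx?_append]
        rfl
  | some old =>
      have hfind : ∃ q, d.items.find? (fun p => p.1 == c) = some q ∧ q.2 = old := by
        simp only [PySem.Dict.get?, Option.map_eq_some_iff] at hg
        obtain ⟨q, hq1, hq2⟩ := hg
        exact ⟨q, hq1, hq2⟩
      obtain ⟨q, hq1, hq2⟩ := hfind
      have hqc : q.1 = c := by simpa using List.find?_some hq1
      have hqmem : q ∈ d.items := List.mem_of_find?_eq_some hq1
      have hq : q = (c, old) := by
        obtain ⟨q1, q2⟩ := q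
        simp_all
      have hfind' : d.items.find? (fun p => p.1 == c) = some (c, old) := by
        rw [hq1, hq]
      have hcont : d.contains c = true := by
        simp only [PySem.Dict.contains, List.any_eq_true]
        exact ⟨q, hqmem, by simp [hqc]⟩
      rw [show (match (some old : Option Int) with
            | none => d.insert c v
            | some o => if o < v then d.insert c v else d)
          = if old < v then d.insert c v else d from rfl]
      by_cases hlt : old < v
      · rw [if_pos hlt]
        have hitems : (d.insert c v).items
            = d.items.map (fun p => if p.1 == c then (c, v) else p) := by
          simp [PySem.Dict.insert, hcont]
        constructor
        · unfold NK
          rw [hitems, List.map_map]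
          have hfst : ((fun p : List Int × Int => Prod.fst p) ∘
              (fun p => if p.1 == c then (c, v) else p)) = Prod.fst := by
            funext p
            by_cases hp : p.1 = c <;> simp [hp]
          rw [show (Prod.fst ∘ (fun p : List Int × Int => if p.1 == c then (c, v) else p))
              = Prod.fst from hfst]
          exact hnk
        · rw [hitems, Mx?_replace g c v old d.items hnk hfind' (le_of_lt hlt)]
      · rw [if_neg hlt]
        refine ⟨hnk, ?_⟩
        have hmem' : ((c, old) : List Int × Int) ∈ d.items := hq ▸ hqmem
        cases hm : Mx? g d.items with
        | none =>
            cases hd : d.items with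
            | nil => rw [hd] at hmem'; simp at hmem'
            | cons a u => rw [hd] at hm; simp [Mx?] at hm
        | some m =>
            have hle := le_Mx? g d.items (c, old) hmem' m hm
            simp only [omax]
            congr 1
            simp at hle ⊢
            omega

-- ---------- B-side folds ----------
-- for 0 ≤ w in range, B's slice-built tuple is A's in-place decrement
theorem slice_set_eq (l : List Int) (w : Int) (hw : 0 ≤ w) (cw v : Int)
    (h : PySem.List.pyGet? l w = some cw) :
    PySem.List.slice l none (some w) ++ [v] ++ PySem.List.slice l (some (w + 1)) none
      = PySem.List.pySetD l w v := by
  have hlt : w < (l.length : Int) := by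
    by_contra hge
    simp [PySem.List.pyGet?, PySem.List.pyIdx?, hw, hge] at h
  have hn : w.toNat < l.length := by omega
  rw [PySem.List.slice_to l hw, PySem.List.slice_from l (by omega : (0:Int) ≤ w + 1),
      show PySem.List.pySetD l w v = l.set w.toNat v from by
        simp [PySem.List.pySetD, PySem.List.pySet?, PySem.List.pyIdx?, hw, hlt],
      show (w + 1).toNat = w.toNat + 1 from by omega,
      List.set_eq_take_cons_drop v hn]
  simp

theorem inner_fold (g : List Int → Int) (len pw : Int) (e : List Int × Int) :
    ∀ (ws : List Int) (d : PySem.Dict (List Int) Int), NK d → (∀ w ∈ ws, 0 ≤ w) →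
      NK (ws.foldl
        (fun nxt w =>
          match PySem.List.pyGet? e.1 w with
          | some cw =>
              if len ≤ cw then
                let nc := PySem.List.slice e.1 none (some w) ++ [cw - len] ++
                          PySem.List.slice e.1 (some (w + 1)) none
                let cand := e.2 + pw
                match nxt.get? nc with
                | none => nxt.insert nc cand
                | some old => if old < cand then nxt.insert nc cand else nxt
              else nxt
          | none => nxt) d) ∧
      Mx? g ((ws.foldl
        (fun nxt w =>
          match PySem.List.pyGet? e.1 w with
          | some cw =>
              if len ≤ cw then
                let nc := PySem.List.slice e.1 none (some w) ++ [cw - len] ++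
                          PySem.List.slice e.1 (some (w + 1)) none
                let cand := e.2 + pw
                match nxt.get? nc with
                | none => nxt.insert nc cand
                | some old => if old < cand then nxt.insert nc cand else nxt
              else nxt
          | none => nxt) d)).items
        = omax (Mx? g d.items) (Rv g len (e.2 + pw) e.1 ws) := by
  intro ws
  induction ws with
  | nil => intro d hnk _; exact ⟨hnk, by simp [Rv, omax_none_right]⟩
  | cons w ws ih =>
      intro d hnk hws
      have hw0 : 0 ≤ w := hws w (by simp)
      have hws' : ∀ x ∈ ws, 0 ≤ x := fun x hx => hws x (by simp [hx])
      cases hcw : PySem.List.pyGet? e.1 w with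
      | none => simpa [List.foldl_cons, Rv, hcw] using ih d hnk hws'
      | some cw =>
          simp only [List.foldl_cons, Rv, hcw]
          by_cases hlen : len ≤ cw
          · rw [if_pos hlen]
            simp only [slice_set_eq e.1 w hw0 cw (cw - len) hcw]
            obtain ⟨hnk', hmx⟩ :=
              condIns g d hnk (PySem.List.pySetD e.1 w (cw - len)) (e.2 + pw)
            obtain ⟨hnk'', hmx'⟩ := ih _ hnk' hws'
            refine ⟨hnk'', ?_⟩
            rw [hmx', hmx, omax_assoc, if_pos hlen]
          · rw [if_neg hlen]
            simpa [hlen] using ih d hnk hws' 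

theorem outer_fold (g : List Int → Int) (len pw : Int) (ws : List Int)
    (hws : ∀ w ∈ ws, 0 ≤ w) :
    ∀ (L : List (List Int × Int)) (d : PySem.Dict (List Int) Int), NK d →
      NK (L.foldl
        (fun nxt e =>
          ws.foldl
            (fun nxt w =>
              match PySem.List.pyGet? e.1 w with
              | some cw =>
                  if len ≤ cw then
                    let nc := PySem.List.slice e.1 none (some w) ++ [cw - len] ++
                              PySem.List.slice e.1 (some (w + 1)) none
                    let cand := e.2 + pw
                    match nxt.get? nc with
                    | none => nxt.insert nc cand
                    | some old => if old < cand then nxt.insert nc cand else nxt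
                  else nxt
              | none => nxt) nxt) d) ∧
      Mx? g ((L.foldl
        (fun nxt e =>
          ws.foldl
            (fun nxt w =>
              match PySem.List.pyGet? e.1 w with
              | some cw =>
                  if len ≤ cw then
                    let nc := PySem.List.slice e.1 none (some w) ++ [cw - len] ++
                              PySem.List.slice e.1 (some (w + 1)) none
                    let cand := e.2 + pw
                    match nxt.get? nc with
                    | none => nxt.insert nc cand
                    | some old => if old < cand then nxt.insert nc cand else nxt
                  else nxt
              | none => nxt) nxt) d)).items
        = omax (Mx? g d.items) (Sv g len pw ws L) := by
  intro L
  induction L with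
  | nil => intro d hnk; exact ⟨hnk, by simp [Sv, omax_none_right]⟩
  | cons e L ih =>
      intro d hnk
      simp only [List.foldl_cons, Sv]
      obtain ⟨hnk', hmx⟩ := inner_fold g len pw e ws d hnk hws
      obtain ⟨hnk'', hmx'⟩ := ih _ hnk'
      refine ⟨hnk'', ?_⟩
      rw [hmx', hmx, omax_assoc]

-- ---------- Fv-side algebra ----------
theorem fold_Fv (g : List Int → Int) (l X : Int) (c : List Int) :
    ∀ (ws : List Int) (base : Int),
      ws.foldl
        (fun m w =>
          match PySem.List.pyGet? c w with
          | some cw => if l ≤ cw then max m (X + g (PySem.List.pySetD c w (cw - l))) else m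
          | none => m) base
      = match Rv g l X c ws with | none => base | some r => max base r := by
  intro ws
  induction ws with
  | nil => intro base; simp [Rv]
  | cons w ws ih =>
      intro base
      simp only [List.foldl_cons]
      cases hcw : PySem.List.pyGet? c w with
      | none => simp only [Rv, hcw]; exact ih base
      | some cw =>
          simp only [Rv, hcw]
          by_cases hl : l ≤ cw
          · rw [if_pos hl, if_pos hl, ih]
            cases hr : Rv g l X c ws <;> simp [omax]
          · rw [if_neg hl, if_neg hl]
            exact ih base

theorem Rv_shift (g : List Int → Int) (l X t : Int) (c : List Int) :
    ∀ ws, Rv g l (t + X) c ws = (Rv g l X c ws).map (t + ·) := by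
  intro ws
  induction ws with
  | nil => simp [Rv]
  | cons w ws ih =>
      cases hcw : PySem.List.pyGet? c w with
      | none => simp only [Rv, hcw]; exact ih
      | some cw =>
          simp only [Rv, hcw]
          by_cases hl : l ≤ cw
          · rw [if_pos hl, if_pos hl, ih]
            cases hr : Rv g l X c ws <;> simp [omax] <;> omega
          · rw [if_neg hl, if_neg hl]
            exact ih

theorem Mx?_cons_spell (k : Int) (sp : Int × Int) (rest : List (Int × Int)) :
    ∀ L, Mx? (Fv k (sp :: rest)) L
      = omax (Mx? (Fv k rest) L)
             (Sv (Fv k rest) sp.1 sp.2 (PySem.List.pyRange 0 k 1) L) := by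
  intro L
  induction L with
  | nil => rfl
  | cons e t ih =>
      simp only [Mx?, Sv, ih]
      have hF : Fv k (sp :: rest) e.1
          = match Rv (Fv k rest) sp.1 sp.2 e.1 (PySem.List.pyRange 0 k 1) with
            | none => Fv k rest e.1
            | some r => max (Fv k rest e.1) r := by
        simp only [Fv]
        exact fold_Fv (Fv k rest) sp.1 sp.2 e.1 _ _
      rw [hF, Rv_shift (Fv k rest) sp.1 sp.2 e.2 e.1 (PySem.List.pyRange 0 k 1)]
      cases h1 : Rv (Fv k rest) sp.1 sp.2 e.1 (PySem.List.pyRange 0 k 1) <;>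
        cases h2 : Mx? (Fv k rest) t <;>
        cases h3 : Sv (Fv k rest) sp.1 sp.2 (PySem.List.pyRange 0 k 1) t <;>
        simp [omax, max_def] <;> split_ifs <;> omega

theorem stepB_Mx (k : Int) (sp : Int × Int) (rest : List (Int × Int))
    (d : PySem.Dict (List Int) Int) (hnk : NK d) :
    NK (stepB k sp.1 sp.2 d) ∧
    Mx? (Fv k rest) (stepB k sp.1 sp.2 d).items = Mx? (Fv k (sp :: rest)) d.items := by
  have hws : ∀ w ∈ PySem.List.pyRange 0 k 1, 0 ≤ w := by
    intro w hw
    exact ((PySem.List.mem_pyRange_one).mp hw).1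
  obtain ⟨h1, h2⟩ := outer_fold (Fv k rest) sp.1 sp.2 _ hws d.items d hnk
  refine ⟨h1, ?_⟩
  rw [Mx?_cons_spell]
  exact h2

theorem spine (k : Int) :
    ∀ (sps : List (Int × Int)) (d : PySem.Dict (List Int) Int), NK d →
      Mx? (fun _ => 0) ((sps.foldl (fun b sp => stepB k sp.1 sp.2 b) d).items)
        = Mx? (Fv k sps) d.items := by
  intro sps
  induction sps with
  | nil =>
      intro d hnk
      simp only [List.foldl_nil]
      rw [show (Fv k ([] : List (Int × Int))) = (fun _ => (0 : Int)) from funext fun _ => rfl]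
  | cons sp sps ih =>
      intro d hnk
      simp only [List.foldl_cons]
      obtain ⟨hnk', hmx⟩ := stepB_Mx k sp sps d hnk
      rw [ih _ hnk', hmx]

-- ===== VERDICT (by name: the statement is the Claim_ definition above) =====
theorem solve_spec : Claim_equal_solve := by
  unfold Claim_equal_solve
  intro spells k limits _dom _hpre
  unfold Spec_solve solve solve_alt
  have hA : dpA (spells.map (fun s => s.1)) (spells.map (fun s => s.2)) k 0 limits
      = Fv k spells limits := by
    simpa using dpA_eq_Fv spells k spells.length 0 limits (by omega)
  rw [hA]
  have hinit : ((PySem.Dict.empty : PySem.Dict (List Int) Int).insert limits 0).items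
      = [(limits, 0)] := by
    simp [PySem.Dict.insert, PySem.Dict.contains, PySem.Dict.empty]
  have hnk0 : NK ((PySem.Dict.empty : PySem.Dict (List Int) Int).insert limits 0) := by
    unfold NK; rw [hinit]; simp
  have hs := spine k spells _ hnk0
  rw [hinit] at hs
  have hfin : Mx? (fun _ => (0 : Int))
      ((spells.foldl (fun b sp => stepB k sp.1 sp.2 b)
        ((PySem.Dict.empty : PySem.Dict (List Int) Int).insert limits 0)).items)
      = some (0 + Fv k spells limits) := hs
  have hvals : PySem.List.max?
      ((spells.foldl (fun b sp => stepB k sp.1 sp.2 b)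
        ((PySem.Dict.empty : PySem.Dict (List Int) Int).insert limits 0)).values)
      (fun v => v) = some (0 + Fv k spells limits) := by
    rw [max?_eq_vmax]
    rw [show ∀ d : PySem.Dict (List Int) Int, d.values = d.items.map (fun x => x.2)
      from fun _ => rfl]
    rw [show (fun x : List Int × Int => x.2)
      = (fun e : List Int × Int => e.2 + (fun _ => (0 : Int)) e.1) from by funext e; simp]
    exact (Mx?_eq_vmax (fun _ => (0 : Int)) _).symm.trans hfin
  simp [hvals]
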